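-- pv_equiv track=rewrite | github.com/Viki2223/TriHetGCN | model/trihetgcn.py | _efficient_bfs_distances
-- ===== SOURCE A (Python) =====
-- from collections import deque
--
-- def _efficient_bfs_distances(adj_list, start_node, max_nodes, max_distance=4):
--     """Efficient BFS for distance computation"""
--     distances = [-1] * max_nodes
--     distances[start_node] = 0
--     queue = deque([start_node])
--
--     while queue:
--         node = queue.popleft()
--         if distances[node] >= max_distance:
--             continue
--
--         for neighbor in adj_list[node]:
--             if distances[neighbor] == -1:
--                 distances[neighbor] = distances[node] + 1
--                 queue.append(neighbor)
--
--     # Convert -1 to max_distance + 1 for unreachable nodes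
--     distances = [d if d != -1 else max_distance + 1 for d in distances]
--     return distances
-- ===== SOURCE B (Python) =====
-- def _efficient_bfs_distances(adj_list, start_node, max_nodes, max_distance=4):
--     """Worklist-free distance computation: round-based relaxation (Bellman-Ford style
--     restricted to one level per round) — no queue/frontier structure at all; each round
--     scans every node and expands exactly the nodes sitting at the current level."""
--     distances = [-1] * max_nodes
--     distances[start_node] = 0
--     for d in range(max_distance):
--         changed = False
--         for u in range(max_nodes):
--             if distances[u] == d:
--                 for v in adj_list[u]:
--                     if distances[v] == -1:
--                         distances[v] = d + 1
--                         changed = True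
--         if not changed:
--             break
--     return [x if x != -1 else max_distance + 1 for x in distances]
-- ===== Notes on version B (the rewrite author's own statement) =====
-- stated objective: alternative
-- what changed: Replaces the deque-based BFS entirely: B keeps no queue or frontier at all and instead runs a round-based relaxation (Bellman-Ford restricted to one level per round) that scans every node each round and expands exactly the nodes currently at the round's level, with a changed-flag fixed-point exit.
-- outside the precondition, e.g. on _efficient_bfs_distances([[0], [0], []], -1, 2, 1): A returns [2, 0], B returns [1, 0]; on _efficient_bfs_distances([[1], [9]], 0, 2, 1): A returns [0, 1], B returns [0, 1]
import Mathlib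
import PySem

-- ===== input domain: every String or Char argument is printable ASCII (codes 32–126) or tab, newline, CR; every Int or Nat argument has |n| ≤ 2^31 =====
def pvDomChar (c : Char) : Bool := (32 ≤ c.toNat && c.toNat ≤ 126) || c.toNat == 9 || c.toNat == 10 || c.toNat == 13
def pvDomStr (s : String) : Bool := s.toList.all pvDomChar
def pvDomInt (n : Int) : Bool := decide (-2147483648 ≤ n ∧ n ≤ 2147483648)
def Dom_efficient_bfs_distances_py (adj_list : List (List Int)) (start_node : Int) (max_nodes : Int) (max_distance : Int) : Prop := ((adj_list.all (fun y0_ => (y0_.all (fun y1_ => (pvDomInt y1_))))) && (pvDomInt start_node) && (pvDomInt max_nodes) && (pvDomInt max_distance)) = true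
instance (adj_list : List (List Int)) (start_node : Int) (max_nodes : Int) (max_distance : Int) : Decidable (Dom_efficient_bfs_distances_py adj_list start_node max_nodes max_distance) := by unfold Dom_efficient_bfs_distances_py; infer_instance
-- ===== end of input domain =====

-- B replaces A's deque-based BFS by a worklist-free round-based relaxation: each round scans
-- every node and expands exactly the nodes at the current distance level (no queue/frontier
-- structure at all), with a changed-flag fixed-point exit. Alternative algorithm, similar cost.


-- ===== PORT A =====
-- The body of A's inner `for neighbor in adj_list[node]` loop (reads distances[node] each
-- iteration, as the Python does).  Where the Python would raise IndexError (neighbor out of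
-- range) the step leaves the state unchanged; those inputs are excluded by Pre_.
def bfsStepA (node : Int) (s : List Int × List Int) (nb : Int) : List Int × List Int :=
  match PySem.List.pyGet? s.1 nb with
  | none => s
  | some v =>
    if v = -1 then
      (PySem.List.pySetD s.1 nb (PySem.List.pyGetD s.1 node 0 + 1), s.2 ++ [nb])
    else s

theorem foldA_allge (node : Int) (nbrs : List Int) (s : List Int × List Int)
    (h : ∀ x ∈ s.1, -1 ≤ x) : ∀ x ∈ (nbrs.foldl (bfsStepA node) s).1, -1 ≤ x := by
  have hmem : ∀ (dd : List Int) (i v x : Int), x ∈ PySem.List.pySetD dd i v → x = v ∨ x ∈ dd := by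
    intro dd i v x hx
    cases hk : PySem.List.pyIdx? dd.length i with
    | none => right; simpa [PySem.List.pySetD, PySem.List.pySet?, hk] using hx
    | some j =>
      rw [show PySem.List.pySetD dd i v = dd.set j v by
        simp [PySem.List.pySetD, PySem.List.pySet?, hk]] at hx
      rcases List.mem_or_eq_of_mem_set hx with h1 | h1
      · exact Or.inr h1
      · exact Or.inl h1
  have hstep : ∀ (s : List Int × List Int) (nb : Int), (∀ x ∈ s.1, -1 ≤ x) →
      ∀ x ∈ (bfsStepA node s nb).1, -1 ≤ x := by
    intro s nb h
    unfold bfsStepA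
    cases hg : PySem.List.pyGet? s.1 nb with
    | none => exact h
    | some v =>
      by_cases hv : v = -1
      · simp only [hv, if_pos rfl, if_true]
        intro x hx
        rcases hmem _ _ _ _ hx with h1 | h1
        · subst h1
          unfold PySem.List.pyGetD
          cases hn : PySem.List.pyGet? s.1 node with
          | none => simp
          | some a => have := h a (PySem.List.mem_of_pyGet?_eq_some _ hn); simp; omega
        · exact h x h1
      · simpa [hv] using h
  induction nbrs generalizing s with
  | nil => exact h
  | cons nb nbrs ih => exact ih _ (hstep s nb h)

theorem foldA_measure (node : Int) (nbrs : List Int) (s : List Int × List Int)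
    (h : ∀ x ∈ s.1, -1 ≤ x) :
    (nbrs.foldl (bfsStepA node) s).1.count (-1) + (nbrs.foldl (bfsStepA node) s).2.length
      = s.1.count (-1) + s.2.length := by
  have hcset : ∀ (dd : List Int) (j : Nat) (v : Int), dd[j]? = some (-1) → v ≠ -1 →
      (dd.set j v).count (-1) + 1 = dd.count (-1) := by
    intro dd j v hj hv
    induction dd generalizing j with
    | nil => simp at hj
    | cons a dd ih =>
      cases j with
      | zero =>
        simp only [List.getElem?_cons_zero, Option.some.injEq] at hj
        subst hj
        simp [hv]
      | succ j =>
        simp only [List.getElem?_cons_succ] at hj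
        have := ih j hj
        simp only [List.set_cons_succ, List.count_cons]
        omega
  have hcount : ∀ (dd : List Int) (i v : Int), PySem.List.pyGet? dd i = some (-1) → v ≠ -1 →
      (PySem.List.pySetD dd i v).count (-1) + 1 = dd.count (-1) := by
    intro dd i v hg hv
    cases hk : PySem.List.pyIdx? dd.length i with
    | none => simp [PySem.List.pyGet?, hk] at hg
    | some j =>
      rw [show PySem.List.pySetD dd i v = dd.set j v by
        simp [PySem.List.pySetD, PySem.List.pySet?, hk]]
      refine hcset dd j v ?_ hv
      simpa [PySem.List.pyGet?, hk] using hg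
  have hstep : ∀ (s : List Int × List Int) (nb : Int), (∀ x ∈ s.1, -1 ≤ x) →
      (bfsStepA node s nb).1.count (-1) + (bfsStepA node s nb).2.length
        = s.1.count (-1) + s.2.length := by
    intro s nb h
    unfold bfsStepA
    cases hg : PySem.List.pyGet? s.1 nb with
    | none => rfl
    | some v =>
      by_cases hv : v = -1
      · subst hv
        simp only [if_pos rfl, if_true]
        have hne : PySem.List.pyGetD s.1 node 0 + 1 ≠ -1 := by
          unfold PySem.List.pyGetD
          cases hn : PySem.List.pyGet? s.1 node with
          | none => simp
          | some a => have := h a (PySem.List.mem_of_pyGet?_eq_some _ hn); simp; omega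
        have := hcount s.1 nb _ hg hne
        simp only [List.length_append, List.length_cons, List.length_nil, List.count_cons]
        omega
      · simp [hv]
  induction nbrs generalizing s with
  | nil => rfl
  | cons nb nbrs ih =>
    have hall : ∀ x ∈ (bfsStepA node s nb).1, -1 ≤ x := foldA_allge node [nb] s h
    rw [List.foldl_cons, ih _ hall, hstep s nb h]

-- A's `while queue:` loop.  The invariant `h` (all stored distances ≥ -1) is carried only to
-- justify termination; where the Python would raise IndexError the loop returns the current
-- distances (those inputs are excluded by Pre_).
def bfsLoopA (adj : List (List Int)) (maxd : Int) (d : List Int) (q : List Int)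
    (h : ∀ x ∈ d, -1 ≤ x) : List Int :=
  match q with
  | [] => d
  | node :: rest =>
    match PySem.List.pyGet? d node with
    | none => d
    | some dist =>
      if maxd ≤ dist then bfsLoopA adj maxd d rest h
      else
        match PySem.List.pyGet? adj node with
        | none => d
        | some nbrs =>
          bfsLoopA adj maxd (nbrs.foldl (bfsStepA node) (d, [])).1
            (rest ++ (nbrs.foldl (bfsStepA node) (d, [])).2)
            (foldA_allge node nbrs (d, []) h)
termination_by d.count (-1) + q.length
decreasing_by
  · simp
  · have := foldA_measure node nbrs (d, []) h
    simp only [List.length_nil] at this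
    simp [List.length_append]
    omega

theorem pv_init_allge (mn start : Int) :
    ∀ x ∈ PySem.List.pySetD (List.replicate mn.toNat (-1 : Int)) start 0, -1 ≤ x := by
  intro x hx
  cases hk : PySem.List.pyIdx? mn.toNat start with
  | none =>
    have hmem : x ∈ List.replicate mn.toNat (-1 : Int) := by
      simpa [PySem.List.pySetD, PySem.List.pySet?, List.length_replicate, hk] using hx
    have := List.eq_of_mem_replicate hmem
    omega
  | some j =>
    rw [show PySem.List.pySetD (List.replicate mn.toNat (-1 : Int)) start 0
        = (List.replicate mn.toNat (-1 : Int)).set j 0 by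
      simp [PySem.List.pySetD, PySem.List.pySet?, List.length_replicate, hk]] at hx
    rcases List.mem_or_eq_of_mem_set hx with h1 | h1
    · have := List.eq_of_mem_replicate h1
      omega
    · omega

def efficient_bfs_distances_py (adj_list : List (List Int)) (start_node : Int) (max_nodes : Int) (max_distance : Int) : List Int :=
  -- distances = [-1] * max_nodes; distances[start_node] = 0  (IndexError excluded by Pre_)
  let init := PySem.List.pySetD (List.replicate max_nodes.toNat (-1 : Int)) start_node 0
  (bfsLoopA adj_list max_distance init [start_node] (pv_init_allge max_nodes start_node)).map
    (fun x => if x ≠ -1 then x else max_distance + 1)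

-- ===== PORT B =====
-- Body of B's innermost `for v in adj_list[u]` loop: set still-unvisited neighbours to lvl+1
-- and raise the changed flag.  (Out-of-range neighbour = IndexError in Python: excluded by Pre_.)
def stepV (lvl : Int) (s : List Int × Bool) (v : Int) : List Int × Bool :=
  match PySem.List.pyGet? s.1 v with
  | none => s
  | some x => if x = -1 then (PySem.List.pySetD s.1 v (lvl + 1), true) else s

-- Body of B's `for u in range(max_nodes)` scan: expand u only if it sits at the current level.
def stepU (adj : List (List Int)) (lvl : Int) (s : List Int × Bool) (u : Int) : List Int × Bool :=
  match PySem.List.pyGet? s.1 u with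
  | none => s
  | some x =>
    if x = lvl then
      match PySem.List.pyGet? adj u with
      | none => s
      | some row => row.foldl (stepV lvl) s
    else s

-- B's `for d in range(max_distance)` loop with the `if not changed: break` exit.
def roundsB (adj : List (List Int)) (mn maxd : Int) (d : List Int) (lvl : Int) : List Int :=
  if maxd ≤ lvl then d
  else
    let t := (PySem.List.pyRange 0 mn 1).foldl (stepU adj lvl) (d, false)
    if t.2 then roundsB adj mn maxd t.1 (lvl + 1) else t.1
termination_by (maxd - lvl).toNat
decreasing_by omega

def efficient_bfs_distances_py_alt (adj_list : List (List Int)) (start_node : Int) (max_nodes : Int) (max_distance : Int) : List Int :=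
  let init := PySem.List.pySetD (List.replicate max_nodes.toNat (-1 : Int)) start_node 0
  (roundsB adj_list max_nodes max_distance init 0).map
    (fun x => if x ≠ -1 then x else max_distance + 1)

-- ===== PRECONDITION & SPEC =====
-- Pre_ admits the inputs on which A provably returns without touching an invalid reference: the
-- start index in range (Python semantics), and either no level is ever expanded (max_distance ≤ 0),
-- or a non-negative start whose row is empty, or the graph is globally well formed (adj_list
-- covering max_nodes rows whose entries are non-negative indices < max_nodes).  A raises
-- IndexError on an out-of-range reference it actually reaches; which references are reached
-- (reachability) is not closed-form, so Pre_ also excludes some inputs on which A returns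
-- (negative wraparound start indices, invalid entries at unreachable nodes) — there A's negative
-- indexing wraps by len(adj_list) while B scans non-negative node ids, so the values can differ.
def Pre_efficient_bfs_distances_py (adj_list : List (List Int)) (start_node : Int) (max_nodes : Int) (max_distance : Int) : Prop :=
  PySem.Raise.InRange max_nodes.toNat start_node ∧
    (max_distance ≤ 0 ∨
      (0 ≤ start_node ∧ PySem.List.pyGet? adj_list start_node = some []) ∨
      (0 ≤ start_node ∧ max_nodes ≤ (adj_list.length : Int) ∧
        ∀ row ∈ adj_list.take max_nodes.toNat, ∀ v ∈ row, 0 ≤ v ∧ v < max_nodes))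
instance (adj_list : List (List Int)) (start_node : Int) (max_nodes : Int) (max_distance : Int) : Decidable (Pre_efficient_bfs_distances_py adj_list start_node max_nodes max_distance) := by unfold Pre_efficient_bfs_distances_py; infer_instance

def pvWitness_efficient_bfs_distances_py : List (List Int) × Int × Int × Int := ([[1], [0]], 0, 2, 4)

def Spec_efficient_bfs_distances_py (adj_list : List (List Int)) (start_node : Int) (max_nodes : Int) (max_distance : Int) (out : List Int) : Prop := out = efficient_bfs_distances_py_alt adj_list start_node max_nodes max_distance
instance (adj_list : List (List Int)) (start_node : Int) (max_nodes : Int) (max_distance : Int) (out : List Int) : Decidable (Spec_efficient_bfs_distances_py adj_list start_node max_nodes max_distance out) := by unfold Spec_efficient_bfs_distances_py; infer_instance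

-- ===== CLAIM (what is proved, stated in full; the proofs are below) =====
def Claim_equal_efficient_bfs_distances_py : Prop := ∀ (adj_list : List (List Int)) (start_node : Int) (max_nodes : Int) (max_distance : Int), Dom_efficient_bfs_distances_py adj_list start_node max_nodes max_distance → Pre_efficient_bfs_distances_py adj_list start_node max_nodes max_distance → Spec_efficient_bfs_distances_py adj_list start_node max_nodes max_distance (efficient_bfs_distances_py adj_list start_node max_nodes max_distance)

-- ===== LEMMAS AND PROOFS =====
-- Facts about PySem indexing specific to this file's state updates.
theorem pv_pyIdx_lt (n : Nat) (i : Int) (j : Nat) (h : PySem.List.pyIdx? n i = some j) : j < n := by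
  simp only [PySem.List.pyIdx?] at h; split_ifs at h <;> simp_all <;> omega

theorem pv_get_eq {α : Type} (d : List α) (i : Int) (j : Nat) (h : PySem.List.pyIdx? d.length i = some j) :
    PySem.List.pyGet? d i = d[j]? := by
  simp [PySem.List.pyGet?, h]

theorem pv_setD_eq {α : Type} (d : List α) (i : Int) (j : Nat) (v : α) (h : PySem.List.pyIdx? d.length i = some j) :
    PySem.List.pySetD d i v = d.set j v := by
  simp [PySem.List.pySetD, PySem.List.pySet?, h]

theorem pv_idx_of_get {α : Type} (d : List α) (i : Int) (a : α) (h : PySem.List.pyGet? d i = some a) :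
    ∃ j : Nat, PySem.List.pyIdx? d.length i = some j ∧ d[j]? = some a := by
  cases hk : PySem.List.pyIdx? d.length i with
  | none => simp [PySem.List.pyGet?, hk] at h
  | some j => exact ⟨j, rfl, by simpa [pv_get_eq d i j hk] using h⟩

theorem pv_mem_pySetD {α : Type} (d : List α) (i : Int) (v x : α) (hx : x ∈ PySem.List.pySetD d i v) :
    x = v ∨ x ∈ d := by
  cases hk : PySem.List.pyIdx? d.length i with
  | none => right; simpa [PySem.List.pySetD, PySem.List.pySet?, hk] using hx
  | some j =>
    rw [pv_setD_eq d i j v hk] at hx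
    rcases List.mem_or_eq_of_mem_set hx with h | h
    · exact Or.inr h
    · exact Or.inl h

-- Well-formedness of the adjacency structure (constant through the computation).
def GoodAdj (adj : List (List Int)) (N : Nat) : Prop :=
  N ≤ adj.length ∧ ∀ row ∈ adj.take N, ∀ v ∈ row, 0 ≤ v ∧ v < (N : Int)

-- All members of a frontier are valid indices currently holding distance ℓ.
def GoodF (d : List Int) (f : List Int) (ℓ : Int) : Prop :=
  ∀ n ∈ f, 0 ≤ n ∧ n < (d.length : Int) ∧ PySem.List.pyGet? d n = some ℓ

theorem pv_get_pySetD_self (d : List Int) (i : Int) (a v : Int)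
    (h : PySem.List.pyGet? d i = some a) :
    PySem.List.pyGet? (PySem.List.pySetD d i v) i = some v := by
  obtain ⟨j, hk, hj⟩ := pv_idx_of_get d i a h
  have hjlt : j < d.length := pv_pyIdx_lt d.length i j hk
  rw [pv_setD_eq d i j v hk,
    pv_get_eq (d.set j v) i j (by rw [List.length_set]; exact hk),
    List.getElem?_set_self (by simpa using hjlt)]

theorem pv_get_pySetD_other (d : List Int) (i m : Int) (v w a : Int)
    (hi : PySem.List.pyGet? d i = some a) (hm : PySem.List.pyGet? d m = some w) (hwa : w ≠ a) :
    PySem.List.pyGet? (PySem.List.pySetD d i v) m = some w := by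
  obtain ⟨j, hk, hj⟩ := pv_idx_of_get d i a hi
  obtain ⟨j', hk', hj'⟩ := pv_idx_of_get d m w hm
  have hne : j ≠ j' := by
    intro he; subst he; rw [hj] at hj'; exact hwa (by simpa using hj'.symm)
  rw [pv_setD_eq d i j v hk,
    pv_get_eq (d.set j v) m j' (by rw [List.length_set]; exact hk'),
    List.getElem?_set_ne hne, hj']

theorem pv_pyGetD_of_get (d : List Int) (i : Int) (a d0 : Int)
    (h : PySem.List.pyGet? d i = some a) : PySem.List.pyGetD d i d0 = a := by
  simp [PySem.List.pyGetD, h]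

-- Proof-side frontier fold: the same per-row update as stepV but accumulating the list of
-- newly discovered nodes (used to describe A's queue level by level).
def bfsStepB (lvl : Int) (s : List Int × List Int) (nb : Int) : List Int × List Int :=
  match PySem.List.pyGet? s.1 nb with
  | none => s
  | some v =>
    if v = -1 then (PySem.List.pySetD s.1 nb (lvl + 1), s.2 ++ [nb]) else s

def bfsNodeB (adj : List (List Int)) (lvl : Int) (s : List Int × List Int) (node : Int) : List Int × List Int :=
  match PySem.List.pyGet? adj node with
  | none => s
  | some nbrs => nbrs.foldl (bfsStepB lvl) s

-- One inner step of A equals one frontier step when distances[node] currently holds lvl.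
theorem stepA_eq_stepB (node lvl : Int) (s : List Int × List Int) (nb : Int)
    (hn : PySem.List.pyGet? s.1 node = some lvl) :
    bfsStepA node s nb = bfsStepB lvl s nb := by
  unfold bfsStepA bfsStepB
  rw [pv_pyGetD_of_get s.1 node lvl 0 hn]

theorem stepB_len (lvl : Int) (s : List Int × List Int) (nb : Int) :
    (bfsStepB lvl s nb).1.length = s.1.length := by
  unfold bfsStepB
  cases hg : PySem.List.pyGet? s.1 nb with
  | none => rfl
  | some v =>
    by_cases hv : v = -1
    · simp [hv, PySem.List.length_pySetD]
    · simp [hv]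

theorem stepB_allge (lvl : Int) (hlvl : 0 ≤ lvl) (s : List Int × List Int) (nb : Int)
    (h : ∀ x ∈ s.1, -1 ≤ x) : ∀ x ∈ (bfsStepB lvl s nb).1, -1 ≤ x := by
  unfold bfsStepB
  cases hg : PySem.List.pyGet? s.1 nb with
  | none => exact h
  | some v =>
    by_cases hv : v = -1
    · simp only [hv, if_pos rfl, if_true]
      intro x hx
      rcases pv_mem_pySetD _ _ _ _ hx with h1 | h1
      · omega
      · exact h x h1
    · simpa [hv] using h

-- Entries currently holding a value ≠ -1 are untouched by the frontier step.
theorem stepB_pres (lvl : Int) (s : List Int × List Int) (nb : Int) (m w : Int)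
    (hm : PySem.List.pyGet? s.1 m = some w) (hw : w ≠ -1) :
    PySem.List.pyGet? (bfsStepB lvl s nb).1 m = some w := by
  unfold bfsStepB
  cases hg : PySem.List.pyGet? s.1 nb with
  | none => exact hm
  | some v =>
    by_cases hv : v = -1
    · simp only [hv, if_pos rfl, if_true]
      exact pv_get_pySetD_other s.1 nb m _ w (-1) (hv ▸ hg) hm hw
    · simpa [hv] using hm

theorem stepB_shift (lvl : Int) (d : List Int) (q : List Int) (nb : Int) :
    bfsStepB lvl (d, q) nb = ((bfsStepB lvl (d, []) nb).1, q ++ (bfsStepB lvl (d, []) nb).2) := by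
  unfold bfsStepB
  cases hg : PySem.List.pyGet? d nb with
  | none => simp
  | some v =>
    by_cases hv : v = -1
    · simp [hv]
    · simp [hv]

-- The frontier step keeps GoodF of the accumulated next frontier.
theorem stepB_goodf (lvl : Int) (hlvl : 0 ≤ lvl) (N : Nat) (s : List Int × List Int) (nb : Int)
    (hlen : s.1.length = N) (hnb : 0 ≤ nb ∧ nb < (N : Int)) (hgf : GoodF s.1 s.2 (lvl + 1)) :
    GoodF (bfsStepB lvl s nb).1 (bfsStepB lvl s nb).2 (lvl + 1) := by
  unfold bfsStepB
  cases hg : PySem.List.pyGet? s.1 nb with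
  | none => exact hgf
  | some v =>
    by_cases hv : v = -1
    · subst hv
      simp only [if_pos rfl, if_true]
      intro n hn
      have hn' : n ∈ s.2 ++ [nb] := hn
      have hlen' : (PySem.List.pySetD s.1 nb (lvl + 1)).length = N := by
        rw [PySem.List.length_pySetD]; exact hlen
      rcases List.mem_append.mp hn' with h1 | h1
      · obtain ⟨b1, b2, b3⟩ := hgf n h1
        exact ⟨b1, by rw [hlen']; omega,
          pv_get_pySetD_other s.1 nb n (lvl + 1) (lvl + 1) (-1) hg b3 (by omega)⟩
      · have hnnb : n = nb := by simpa using h1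
        refine ⟨?_, ?_, ?_⟩
        · rw [hnnb]; exact hnb.1
        · rw [hlen']; omega
        · rw [hnnb]; exact pv_get_pySetD_self s.1 nb (-1) (lvl + 1) hg
    · simpa [hv] using hgf

-- Invariants carried through the frontier fold over one neighbour row.
theorem foldB_inv (lvl : Int) (hlvl : 0 ≤ lvl) (N : Nat) (nbrs : List Int) :
    ∀ (s : List Int × List Int), (∀ v ∈ nbrs, 0 ≤ v ∧ v < (N : Int)) →
    s.1.length = N → (∀ x ∈ s.1, -1 ≤ x) →
    GoodF s.1 s.2 (lvl + 1) →
    (nbrs.foldl (bfsStepB lvl) s).1.length = N ∧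
    (∀ x ∈ (nbrs.foldl (bfsStepB lvl) s).1, -1 ≤ x) ∧
    GoodF (nbrs.foldl (bfsStepB lvl) s).1 (nbrs.foldl (bfsStepB lvl) s).2 (lvl + 1) ∧
    (∀ m w : Int, PySem.List.pyGet? s.1 m = some w → w ≠ -1 →
      PySem.List.pyGet? (nbrs.foldl (bfsStepB lvl) s).1 m = some w) := by
  induction nbrs with
  | nil => exact fun s _ hlen hge hgf => ⟨hlen, hge, hgf, fun m w hm _ => hm⟩
  | cons nb nbrs ih =>
    intro s hrow hlen hge hgf
    simp only [List.foldl_cons]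
    have hnb := hrow nb (List.mem_cons_self ..)
    have h4 := ih (bfsStepB lvl s nb) (fun v hv => hrow v (List.mem_cons_of_mem _ hv))
      (by rw [stepB_len]; exact hlen) (stepB_allge lvl hlvl s nb hge)
      (stepB_goodf lvl hlvl N s nb hlen hnb hgf)
    exact ⟨h4.1, h4.2.1, h4.2.2.1,
      fun m w hm hw => h4.2.2.2 m w (stepB_pres lvl s nb m w hm hw) hw⟩

-- A valid node index yields a well-formed row of the adjacency list.
theorem pv_adj_row (adj : List (List Int)) (N : Nat) (hadj : GoodAdj adj N) (node : Int)
    (h0 : 0 ≤ node) (h1 : node < (N : Int)) :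
    ∃ nbrs, PySem.List.pyGet? adj node = some nbrs ∧ ∀ v ∈ nbrs, 0 ≤ v ∧ v < (N : Int) := by
  have hlt : node.toNat < N := by omega
  have hlt' : node.toNat < adj.length := lt_of_lt_of_le hlt hadj.1
  refine ⟨adj[node.toNat], ?_, ?_⟩
  · rw [PySem.List.pyGet?_of_nonneg adj h0]
    exact List.getElem?_eq_getElem hlt'
  · refine hadj.2 adj[node.toNat] ?_
    have htl : node.toNat < (adj.take N).length := by
      rw [List.length_take]; omega
    have heq : (adj.take N)[node.toNat]'htl = adj[node.toNat] := List.getElem_take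
    rw [← heq]
    exact List.getElem_mem htl

theorem foldNodeB_inv (adj : List (List Int)) (lvl : Int) (hlvl : 0 ≤ lvl) (N : Nat) (f : List Int) :
    ∀ (s : List Int × List Int),
    (∀ n ∈ f, 0 ≤ n ∧ n < (N : Int) ∧
      ∃ row, PySem.List.pyGet? adj n = some row ∧ ∀ v ∈ row, 0 ≤ v ∧ v < (N : Int)) →
    s.1.length = N → (∀ x ∈ s.1, -1 ≤ x) → GoodF s.1 s.2 (lvl + 1) →
    (f.foldl (bfsNodeB adj lvl) s).1.length = N ∧
    (∀ x ∈ (f.foldl (bfsNodeB adj lvl) s).1, -1 ≤ x) ∧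
    GoodF (f.foldl (bfsNodeB adj lvl) s).1 (f.foldl (bfsNodeB adj lvl) s).2 (lvl + 1) ∧
    (∀ m w : Int, PySem.List.pyGet? s.1 m = some w → w ≠ -1 →
      PySem.List.pyGet? (f.foldl (bfsNodeB adj lvl) s).1 m = some w) := by
  induction f with
  | nil => exact fun s _ hlen hge hgf => ⟨hlen, hge, hgf, fun m w hm _ => hm⟩
  | cons node f ih =>
    intro s hfr hlen hge hgf
    obtain ⟨h0, h1, nbrs, hgetrow, hrow⟩ := hfr node (List.mem_cons_self ..)
    have hone : bfsNodeB adj lvl s node = nbrs.foldl (bfsStepB lvl) s := by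
      unfold bfsNodeB; rw [hgetrow]
    have hin := foldB_inv lvl hlvl N nbrs s hrow hlen hge hgf
    simp only [List.foldl_cons, hone]
    have h4 := ih (nbrs.foldl (bfsStepB lvl) s) (fun n hn => hfr n (List.mem_cons_of_mem _ hn))
      hin.1 hin.2.1 hin.2.2.1
    exact ⟨h4.1, h4.2.1, h4.2.2.1,
      fun m w hm hw => h4.2.2.2 m w (hin.2.2.2 m w hm hw) hw⟩

-- The second component of the frontier folds is a pure accumulator: it can be split off.
theorem foldB_snd_shift (lvl : Int) (nbrs : List Int) (d : List Int) (q : List Int) :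
    nbrs.foldl (bfsStepB lvl) (d, q)
      = ((nbrs.foldl (bfsStepB lvl) (d, [])).1, q ++ (nbrs.foldl (bfsStepB lvl) (d, [])).2) := by
  induction nbrs generalizing d q with
  | nil => simp
  | cons nb nbrs ih =>
    simp only [List.foldl_cons]
    rw [stepB_shift lvl d q nb, ih, stepB_shift lvl d [] nb, List.nil_append,
      ih ((bfsStepB lvl (d, []) nb).1) ((bfsStepB lvl (d, []) nb).2), List.append_assoc]

theorem foldNodeB_snd_shift (adj : List (List Int)) (lvl : Int) (f : List Int) (d : List Int) (q : List Int) :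
    f.foldl (bfsNodeB adj lvl) (d, q)
      = ((f.foldl (bfsNodeB adj lvl) (d, [])).1, q ++ (f.foldl (bfsNodeB adj lvl) (d, [])).2) := by
  induction f generalizing d q with
  | nil => simp
  | cons node f ih =>
    have hstep : ∀ q' : List Int, bfsNodeB adj lvl (d, q') node
        = ((bfsNodeB adj lvl (d, []) node).1, q' ++ (bfsNodeB adj lvl (d, []) node).2) := by
      intro q'
      unfold bfsNodeB
      cases hg : PySem.List.pyGet? adj node with
      | none => simp
      | some nbrs => exact foldB_snd_shift lvl nbrs d q'
    simp only [List.foldl_cons]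
    rw [hstep q, ih, hstep [], List.nil_append,
      ih ((bfsNodeB adj lvl (d, []) node).1) ((bfsNodeB adj lvl (d, []) node).2), List.append_assoc]

-- Both arguments of A's loop may be rewritten at once (the invariant proof is irrelevant).
theorem bfsLoopA_congr (adj : List (List Int)) (maxd : Int) (D1 D2 Q1 Q2 : List Int)
    (h1 : ∀ x ∈ D1, -1 ≤ x) (h2 : ∀ x ∈ D2, -1 ≤ x) (hD : D1 = D2) (hQ : Q1 = Q2) :
    bfsLoopA adj maxd D1 Q1 h1 = bfsLoopA adj maxd D2 Q2 h2 := by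
  subst hD; subst hQ; rfl

-- While distances[node] holds lvl, A's inner loop computes exactly the frontier row fold.
theorem foldAB (node lvl : Int) (hlvl : 0 ≤ lvl) (nbrs : List Int) :
    ∀ (s : List Int × List Int), (∀ x ∈ s.1, -1 ≤ x) →
    PySem.List.pyGet? s.1 node = some lvl →
    nbrs.foldl (bfsStepA node) s = nbrs.foldl (bfsStepB lvl) s := by
  induction nbrs with
  | nil => exact fun s _ _ => rfl
  | cons nb nbrs ih =>
    intro s hge hn
    simp only [List.foldl_cons, stepA_eq_stepB node lvl s nb hn]
    exact ih (bfsStepB lvl s nb) (stepB_allge lvl hlvl s nb hge)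
      (stepB_pres lvl s nb node lvl hn (by omega))

-- A's loop drains a queue whose members all sit at distance ≥ max_distance without changes.
theorem loopA_skip (adj : List (List Int)) (maxd lvl : Int) (hle : maxd ≤ lvl) :
    ∀ (f : List Int) (d : List Int) (h : ∀ x ∈ d, -1 ≤ x),
    (∀ n ∈ f, PySem.List.pyGet? d n = some lvl) → bfsLoopA adj maxd d f h = d := by
  intro f
  induction f with
  | nil => intro d h _; rw [bfsLoopA]
  | cons n f ih =>
    intro d h hall
    rw [bfsLoopA]
    simp only [hall n (List.mem_cons_self ..)]
    rw [if_pos hle]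
    exact ih d h (fun m hm => hall m (List.mem_cons_of_mem _ hm))

-- Processing one whole level of A's queue equals one frontier fold over that level.
theorem loopA_level (adj : List (List Int)) (maxd : Int) (N : Nat) (hadj : GoodAdj adj N)
    (lvl : Int) (hlvl : 0 ≤ lvl) (hlt : lvl < maxd) :
    ∀ (f d acc : List Int) (h : ∀ x ∈ d, -1 ≤ x)
      (h' : ∀ x ∈ (f.foldl (bfsNodeB adj lvl) (d, [])).1, -1 ≤ x),
    d.length = N → GoodF d f lvl →
    bfsLoopA adj maxd d (f ++ acc) h
      = bfsLoopA adj maxd (f.foldl (bfsNodeB adj lvl) (d, [])).1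
          (acc ++ (f.foldl (bfsNodeB adj lvl) (d, [])).2) h' := by
  intro f
  induction f with
  | nil =>
    intro d acc h h' hlen hgf
    exact bfsLoopA_congr adj maxd d _ acc _ h h' rfl (by simp)
  | cons node rest ih =>
    intro d acc h h' hlen hgf
    obtain ⟨hb0, hb1, hbg⟩ := hgf node (List.mem_cons_self ..)
    rw [hlen] at hb1
    obtain ⟨nbrs, hgetrow, hrow⟩ := pv_adj_row adj N hadj node hb0 hb1
    have hAB : nbrs.foldl (bfsStepA node) (d, ([] : List Int)) = nbrs.foldl (bfsStepB lvl) (d, []) :=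
      foldAB node lvl hlvl nbrs (d, []) h hbg
    have hrowinv := foldB_inv lvl hlvl N nbrs (d, []) hrow hlen h
      (fun n hn => absurd hn (List.not_mem_nil))
    -- invariants of the frontier tail after processing node's row
    have hgf' : GoodF (nbrs.foldl (bfsStepB lvl) (d, [])).1 rest lvl := by
      intro n hn
      obtain ⟨c0, c1, c2⟩ := hgf n (List.mem_cons_of_mem _ hn)
      exact ⟨c0, by rw [hrowinv.1]; rw [hlen] at c1; exact c1,
        hrowinv.2.2.2 n lvl c2 (by omega)⟩
    have hRinv := foldNodeB_inv adj lvl hlvl N rest ((nbrs.foldl (bfsStepB lvl) (d, [])).1, [])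
      (fun n hn => ⟨(hgf' n hn).1,
        (by have := (hgf' n hn).2.1; rw [hrowinv.1] at this; exact this),
        pv_adj_row adj N hadj n (hgf' n hn).1
          (by have := (hgf' n hn).2.1; rw [hrowinv.1] at this; exact this)⟩)
      hrowinv.1 hrowinv.2.1 (fun n hn => absurd hn (List.not_mem_nil))
    have hF : (node :: rest).foldl (bfsNodeB adj lvl) (d, ([] : List Int))
        = ((rest.foldl (bfsNodeB adj lvl) ((nbrs.foldl (bfsStepB lvl) (d, [])).1, [])).1,
           (nbrs.foldl (bfsStepB lvl) (d, [])).2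
             ++ (rest.foldl (bfsNodeB adj lvl) ((nbrs.foldl (bfsStepB lvl) (d, [])).1, [])).2) := by
      simp only [List.foldl_cons]
      have hone : bfsNodeB adj lvl (d, []) node = nbrs.foldl (bfsStepB lvl) (d, []) := by
        unfold bfsNodeB; rw [hgetrow]
      rw [hone, ← foldNodeB_snd_shift adj lvl rest]
    -- unfold one iteration of A's loop
    simp only [List.cons_append]
    rw [bfsLoopA]
    simp only [hbg]
    rw [if_neg (by omega : ¬ maxd ≤ lvl)]
    simp only [hgetrow]
    calc bfsLoopA adj maxd (nbrs.foldl (bfsStepA node) (d, [])).1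
          ((rest ++ acc) ++ (nbrs.foldl (bfsStepA node) (d, [])).2)
          (foldA_allge node nbrs (d, []) h)
        = bfsLoopA adj maxd (nbrs.foldl (bfsStepB lvl) (d, [])).1
            (rest ++ (acc ++ (nbrs.foldl (bfsStepB lvl) (d, [])).2)) hrowinv.2.1 :=
          bfsLoopA_congr adj maxd _ _ _ _ _ _ (by rw [hAB]) (by rw [hAB, List.append_assoc])
      _ = bfsLoopA adj maxd
            (rest.foldl (bfsNodeB adj lvl) ((nbrs.foldl (bfsStepB lvl) (d, [])).1, [])).1
            ((acc ++ (nbrs.foldl (bfsStepB lvl) (d, [])).2)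
              ++ (rest.foldl (bfsNodeB adj lvl) ((nbrs.foldl (bfsStepB lvl) (d, [])).1, [])).2)
            hRinv.2.1 :=
          ih (nbrs.foldl (bfsStepB lvl) (d, [])).1 (acc ++ (nbrs.foldl (bfsStepB lvl) (d, [])).2)
            hrowinv.2.1 hRinv.2.1 hrowinv.1 hgf'
      _ = bfsLoopA adj maxd ((node :: rest).foldl (bfsNodeB adj lvl) (d, [])).1
            (acc ++ ((node :: rest).foldl (bfsNodeB adj lvl) (d, [])).2) h' :=
          bfsLoopA_congr adj maxd _ _ _ _ _ _ (by rw [hF]) (by rw [hF, List.append_assoc])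

-- An in-range Python index has a normalized position below the length.
theorem pv_inrange_idx (N : Nat) (i : Int) (h : PySem.Raise.InRange N i) :
    ∃ j : Nat, PySem.List.pyIdx? N i = some j := by
  obtain ⟨h1, h2⟩ := h
  by_cases hs : 0 ≤ i
  · exact ⟨i.toNat, by unfold PySem.List.pyIdx?; rw [if_pos hs, if_pos h2]⟩
  · exact ⟨N - (-i).toNat, by unfold PySem.List.pyIdx?; rw [if_neg hs, if_pos h1]⟩

theorem pv_get_replicate (N : Nat) (i : Int) (h : PySem.Raise.InRange N i) :
    PySem.List.pyGet? (List.replicate N (-1 : Int)) i = some (-1) := by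
  obtain ⟨j, hj⟩ := pv_inrange_idx N i h
  have hj' : PySem.List.pyIdx? (List.replicate N (-1 : Int)).length i = some j := by
    rw [List.length_replicate]; exact hj
  rw [pv_get_eq _ i j hj']
  have hlt : j < N := pv_pyIdx_lt N i j hj
  simp [List.getElem?_replicate, hlt]

-- The freshly initialized distances list holds 0 at the start index.
theorem pv_init_get_start (mn start : Int) (h : PySem.Raise.InRange mn.toNat start) :
    PySem.List.pyGet? (PySem.List.pySetD (List.replicate mn.toNat (-1 : Int)) start 0) start
      = some 0 :=
  pv_get_pySetD_self _ start (-1) 0 (pv_get_replicate mn.toNat start h)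

-- j is a neighbour of node u (read off the adjacency list).
def NbrOf (adj : List (List Int)) (u : Int) (j : Nat) : Prop :=
  ∃ row, PySem.List.pyGet? adj u = some row ∧ (j : Int) ∈ row

-- `MidD lvl d d1 P`: d1 is d with exactly the unvisited positions satisfying P set to lvl+1.
def MidD (lvl : Int) (d d1 : List Int) (P : Nat → Prop) : Prop :=
  d1.length = d.length ∧ ∀ j : Nat, j < d.length →
    ((d[j]? = some (-1) ∧ P j) → d1[j]? = some (lvl + 1)) ∧
    (¬ (d[j]? = some (-1) ∧ P j) → d1[j]? = d[j]?)

theorem MidD_id (lvl : Int) (d : List Int) (P : Nat → Prop)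
    (hP : ∀ j, j < d.length → P j → d[j]? ≠ some (-1)) : MidD lvl d d P :=
  ⟨rfl, fun j hj => ⟨fun hc => absurd hc.1 (hP j hj hc.2), fun _ => rfl⟩⟩

theorem MidD_congr (lvl : Int) (d d1 : List Int) (P Q : Nat → Prop)
    (hPQ : ∀ j, j < d.length → d[j]? = some (-1) → (P j ↔ Q j))
    (h : MidD lvl d d1 P) : MidD lvl d d1 Q := by
  refine ⟨h.1, fun j hj => ?_⟩
  obtain ⟨h1, h2⟩ := h.2 j hj
  by_cases hd : d[j]? = some (-1)
  · constructor
    · rintro ⟨_, hq⟩; exact h1 ⟨hd, (hPQ j hj hd).mpr hq⟩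
    · intro hn; apply h2; rintro ⟨_, hp⟩; exact hn ⟨hd, (hPQ j hj hd).mp hp⟩
  · constructor
    · rintro ⟨hd', _⟩; exact absurd hd' hd
    · intro _; apply h2; rintro ⟨hd', _⟩; exact hd hd'

theorem MidD_comp (lvl : Int) (hlvl : 0 ≤ lvl) (d d1 d2 : List Int) (P Q : Nat → Prop)
    (h1 : MidD lvl d d1 P) (h2 : MidD lvl d1 d2 Q) :
    MidD lvl d d2 (fun j => P j ∨ Q j) := by
  refine ⟨h2.1.trans h1.1, fun j hj => ?_⟩
  have hj1 : j < d1.length := by rw [h1.1]; exact hj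
  obtain ⟨a1, a2⟩ := h1.2 j hj
  obtain ⟨b1, b2⟩ := h2.2 j hj1
  constructor
  · rintro ⟨hd, hpq⟩
    by_cases hp : P j
    · have e1 : d1[j]? = some (lvl + 1) := a1 ⟨hd, hp⟩
      have hnq : ¬ (d1[j]? = some (-1) ∧ Q j) := by
        rintro ⟨he, _⟩; rw [e1] at he
        have : lvl + 1 = -1 := by simpa using he
        omega
      rw [b2 hnq, e1]
    · rcases hpq with hp' | hq
      · exact absurd hp' hp
      · have e1 : d1[j]? = d[j]? := a2 (by rintro ⟨_, hp'⟩; exact hp hp')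
        exact b1 ⟨by rw [e1, hd], hq⟩
  · intro hn
    by_cases hd : d[j]? = some (-1)
    · have hp : ¬ P j := fun hp => hn ⟨hd, Or.inl hp⟩
      have hq : ¬ Q j := fun hq => hn ⟨hd, Or.inr hq⟩
      have e1 : d1[j]? = d[j]? := a2 (by rintro ⟨_, c⟩; exact hp c)
      have e2 : d2[j]? = d1[j]? := b2 (by rintro ⟨_, c⟩; exact hq c)
      rw [e2, e1]
    · have e1 : d1[j]? = d[j]? := a2 (by rintro ⟨c, _⟩; exact hd c)
      have e2 : d2[j]? = d1[j]? := b2 (by rintro ⟨c, _⟩; rw [e1] at c; exact hd c)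
      rw [e2, e1]

theorem MidD_unique (lvl : Int) (d x y : List Int) (P Q : Nat → Prop)
    (h1 : MidD lvl d x P) (h2 : MidD lvl d y Q)
    (hiff : ∀ j, j < d.length → d[j]? = some (-1) → (P j ↔ Q j)) : x = y := by
  apply List.ext_getElem?
  intro i
  by_cases hi : i < d.length
  · by_cases hc : d[i]? = some (-1) ∧ P i
    · rw [(h1.2 i hi).1 hc, (h2.2 i hi).1 ⟨hc.1, (hiff i hi hc.1).mp hc.2⟩]
    · have hc2 : ¬ (d[i]? = some (-1) ∧ Q i) := by
        rintro ⟨hd, hq⟩; exact hc ⟨hd, (hiff i hi hd).mpr hq⟩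
      rw [(h1.2 i hi).2 hc, (h2.2 i hi).2 hc2]
  · have e1 : x[i]? = none := List.getElem?_eq_none (by rw [h1.1]; omega)
    have e2 : y[i]? = none := List.getElem?_eq_none (by rw [h2.1]; omega)
    rw [e1, e2]

theorem MidD_assign (lvl : Int) (d : List Int) (v : Int) (h0 : 0 ≤ v) (h1 : v < (d.length : Int))
    (hv : d[v.toNat]? = some (-1)) :
    MidD lvl d (PySem.List.pySetD d v (lvl + 1)) (fun j => (j : Int) = v) := by
  rw [PySem.List.pySetD_of_nonneg d (lvl + 1) h0]
  have hvt : v.toNat < d.length := by omega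
  refine ⟨by simp, fun j hj => ?_⟩
  by_cases hjv : j = v.toNat
  · subst hjv
    constructor
    · intro _; rw [List.getElem?_set_self (by omega)]
    · intro hn; exact absurd ⟨hv, by omega⟩ hn
  · have hne : (j : Int) ≠ v := by omega
    constructor
    · rintro ⟨_, he⟩; exact absurd he hne
    · intro _; rw [List.getElem?_set_ne (fun h => hjv h.symm)]

-- Characterization of one inner row fold of B (dist update and changed flag).
theorem charRowV (lvl : Int) (hlvl : 0 ≤ lvl) (row : List Int) :
    ∀ (d : List Int) (c : Bool), (∀ v ∈ row, 0 ≤ v ∧ v < (d.length : Int)) →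
    MidD lvl d (row.foldl (stepV lvl) (d, c)).1 (fun j => (j : Int) ∈ row) ∧
    ((row.foldl (stepV lvl) (d, c)).2 = true ↔
      (c = true ∨ ∃ j : Nat, j < d.length ∧ d[j]? = some (-1) ∧ (j : Int) ∈ row)) := by
  induction row with
  | nil =>
    intro d c _
    refine ⟨MidD_id lvl d _ (by simp), by simp⟩
  | cons v row ih =>
    intro d c hb
    obtain ⟨h0, h1⟩ := hb v (List.mem_cons_self ..)
    have hvt : v.toNat < d.length := by omega
    have hget : PySem.List.pyGet? d v = d[v.toNat]? := PySem.List.pyGet?_of_nonneg d h0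
    have hsome : d[v.toNat]? = some d[v.toNat] := List.getElem?_eq_getElem hvt
    simp only [List.foldl_cons]
    by_cases ha : d[v.toNat] = -1
    · have hstep : stepV lvl (d, c) v = (PySem.List.pySetD d v (lvl + 1), true) := by
        unfold stepV
        rw [hget, hsome]
        simp [ha]
      rw [hstep]
      have hlen1 : (PySem.List.pySetD d v (lvl + 1)).length = d.length :=
        PySem.List.length_pySetD ..
      have hb1 : ∀ u ∈ row, 0 ≤ u ∧ u < ((PySem.List.pySetD d v (lvl + 1)).length : Int) := by
        refine fun u hu => ⟨(hb u (List.mem_cons_of_mem _ hu)).1, ?_⟩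
        have := (hb u (List.mem_cons_of_mem _ hu)).2
        omega
      obtain ⟨hM, hF⟩ := ih (PySem.List.pySetD d v (lvl + 1)) true hb1
      constructor
      · have hcomp := MidD_comp lvl hlvl d _ _ _ _
          (MidD_assign lvl d v h0 h1 (by rw [hsome, ha])) hM
        refine MidD_congr lvl d _ _ _ (fun j hj _ => ?_) hcomp
        simp [List.mem_cons]
      · have htrue : (row.foldl (stepV lvl) (PySem.List.pySetD d v (lvl + 1), true)).2 = true :=
          hF.mpr (Or.inl rfl)
        rw [htrue]
        constructor
        · intro _
          refine Or.inr ⟨v.toNat, hvt, by rw [hsome, ha], ?_⟩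
          have : ((v.toNat : Nat) : Int) = v := Int.toNat_of_nonneg h0
          rw [this]; exact List.mem_cons_self ..
        · intro _; rfl
    · have hstep : stepV lvl (d, c) v = (d, c) := by
        unfold stepV
        rw [hget, hsome]
        simp [ha]
      rw [hstep]
      obtain ⟨hM, hF⟩ := ih d c (fun u hu => hb u (List.mem_cons_of_mem _ hu))
      have hjnotv : ∀ j : Nat, j < d.length → d[j]? = some (-1) → (j : Int) ≠ v := by
        intro j hj hd he
        have : j = v.toNat := by omega
        subst this
        rw [hsome] at hd
        exact ha (by simpa using hd)
      constructor
      · refine MidD_congr lvl d _ _ _ (fun j hj hd => ?_) hM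
        simp only [List.mem_cons]
        constructor
        · exact Or.inr
        · rintro (he | h')
          · exact absurd he (hjnotv j hj hd)
          · exact h'
      · rw [hF]
        constructor
        · rintro (hc | ⟨j, hj, hd, hr⟩)
          · exact Or.inl hc
          · exact Or.inr ⟨j, hj, hd, List.mem_cons_of_mem _ hr⟩
        · rintro (hc | ⟨j, hj, hd, hr⟩)
          · exact Or.inl hc
          · rcases List.mem_cons.mp hr with he | hr'
            · exact absurd he (hjnotv j hj hd)
            · exact Or.inr ⟨j, hj, hd, hr'⟩

-- The dist component of the proof-side frontier row fold equals that of B's row fold.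
theorem foldRow_fst_eq (lvl : Int) (row : List Int) :
    ∀ (d q : List Int) (c : Bool),
    (row.foldl (bfsStepB lvl) (d, q)).1 = (row.foldl (stepV lvl) (d, c)).1 := by
  induction row with
  | nil => intro d q c; rfl
  | cons nb row ih =>
    intro d q c
    simp only [List.foldl_cons]
    have hB : bfsStepB lvl (d, q) nb =
        (if (PySem.List.pyGet? d nb).getD 0 = -1 ∧ (PySem.List.pyGet? d nb).isSome
          then (PySem.List.pySetD d nb (lvl + 1), q ++ [nb]) else (d, q)) := by
      unfold bfsStepB
      cases hg : PySem.List.pyGet? d nb with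
      | none => simp
      | some v => by_cases hv : v = -1 <;> simp [hg, hv]
    have hV : stepV lvl (d, c) nb =
        (if (PySem.List.pyGet? d nb).getD 0 = -1 ∧ (PySem.List.pyGet? d nb).isSome
          then (PySem.List.pySetD d nb (lvl + 1), true) else (d, c)) := by
      unfold stepV
      cases hg : PySem.List.pyGet? d nb with
      | none => simp
      | some v => by_cases hv : v = -1 <;> simp [hg, hv]
    rw [hB, hV]
    by_cases hc : (PySem.List.pyGet? d nb).getD 0 = -1 ∧ (PySem.List.pyGet? d nb).isSome
    · rw [if_pos hc, if_pos hc]; exact ih _ _ _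
    · rw [if_neg hc, if_neg hc]; exact ih _ _ _

-- Characterization of the frontier fold's dist component.
theorem charNodeF (adj : List (List Int)) (lvl : Int) (hlvl : 0 ≤ lvl) (f : List Int) :
    ∀ (d q : List Int),
    (∀ u ∈ f, ∃ row, PySem.List.pyGet? adj u = some row ∧
      ∀ v ∈ row, 0 ≤ v ∧ v < (d.length : Int)) →
    MidD lvl d (f.foldl (bfsNodeB adj lvl) (d, q)).1 (fun j => ∃ u ∈ f, NbrOf adj u j) := by
  induction f with
  | nil =>
    intro d q _
    exact MidD_id lvl d _ (fun j hj hp => absurd hp (by simp))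
  | cons u f ih =>
    intro d q hr
    obtain ⟨row, hrow, hbv⟩ := hr u (List.mem_cons_self ..)
    simp only [List.foldl_cons]
    have hnode : bfsNodeB adj lvl (d, q) u = row.foldl (bfsStepB lvl) (d, q) := by
      unfold bfsNodeB; rw [hrow]
    rw [hnode]
    have hfst : (row.foldl (bfsStepB lvl) (d, q)).1 = (row.foldl (stepV lvl) (d, false)).1 :=
      foldRow_fst_eq lvl row d q false
    have hM1 : MidD lvl d (row.foldl (bfsStepB lvl) (d, q)).1 (fun j => (j : Int) ∈ row) := by
      rw [hfst]; exact (charRowV lvl hlvl row d false hbv).1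
    have hlen1 : (row.foldl (bfsStepB lvl) (d, q)).1.length = d.length := hM1.1
    have hr1 : ∀ u' ∈ f, ∃ row', PySem.List.pyGet? adj u' = some row' ∧
        ∀ v ∈ row', 0 ≤ v ∧ v < (((row.foldl (bfsStepB lvl) (d, q)).1).length : Int) := by
      intro u' hu'
      obtain ⟨row', h1', h2'⟩ := hr u' (List.mem_cons_of_mem _ hu')
      exact ⟨row', h1', fun v hv => ⟨(h2' v hv).1, by have := (h2' v hv).2; omega⟩⟩
    have hIH := ih (row.foldl (bfsStepB lvl) (d, q)).1 (row.foldl (bfsStepB lvl) (d, q)).2 hr1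
    rw [Prod.mk.eta] at hIH
    have hcomp := MidD_comp lvl hlvl d _ _ _ _ hM1 hIH
    refine MidD_congr lvl d _ _ _ (fun j hj _ => ?_) hcomp
    constructor
    · rintro (hjr | ⟨u', hu', hn⟩)
      · exact ⟨u, List.mem_cons_self .., row, hrow, hjr⟩
      · exact ⟨u', List.mem_cons_of_mem _ hu', hn⟩
    · rintro ⟨u', hu', hn⟩
      rcases List.mem_cons.mp hu' with rfl | hu''
      · obtain ⟨row', hrow', hj'⟩ := hn
        rw [hrow] at hrow'
        injection hrow' with he
        subst he
        exact Or.inl hj'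
      · exact Or.inr ⟨u', hu'', hn⟩

-- Characterization of one whole scan round of B (dist update and changed flag), relative to
-- the dist array d the round started from.
theorem charScan (adj : List (List Int)) (lvl : Int) (hlvl : 0 ≤ lvl) (d : List Int)
    (hrows : ∀ u : Int, 0 ≤ u → u < (d.length : Int) → PySem.List.pyGet? d u = some lvl →
      ∃ row, PySem.List.pyGet? adj u = some row ∧ ∀ v ∈ row, 0 ≤ v ∧ v < (d.length : Int)) :
    ∀ (L : List Int), (∀ u ∈ L, 0 ≤ u ∧ u < (d.length : Int)) →
    ∀ (d1 : List Int) (c : Bool) (P : Nat → Prop), MidD lvl d d1 P →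
    MidD lvl d (L.foldl (stepU adj lvl) (d1, c)).1
      (fun j => P j ∨ ∃ u ∈ L, PySem.List.pyGet? d u = some lvl ∧ NbrOf adj u j) ∧
    ((L.foldl (stepU adj lvl) (d1, c)).2 = true ↔
      (c = true ∨ ∃ j : Nat, j < d.length ∧ d[j]? = some (-1) ∧ ¬ P j ∧
        ∃ u ∈ L, PySem.List.pyGet? d u = some lvl ∧ NbrOf adj u j)) := by
  intro L
  induction L with
  | nil =>
    intro _ d1 c P hM
    constructor
    · refine MidD_congr lvl d _ _ _ (fun j hj _ => ?_) hM
      simp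
    · simp
  | cons u L ih =>
    intro hb d1 c P hM
    obtain ⟨hu0, hu1⟩ := hb u (List.mem_cons_self ..)
    have hut : u.toNat < d.length := by omega
    have hlen1 : d1.length = d.length := hM.1
    have hut1 : u.toNat < d1.length := by omega
    have hget1 : PySem.List.pyGet? d1 u = d1[u.toNat]? := PySem.List.pyGet?_of_nonneg d1 hu0
    have hgetd : PySem.List.pyGet? d u = d[u.toNat]? := PySem.List.pyGet?_of_nonneg d hu0
    have hsome1 : d1[u.toNat]? = some d1[u.toNat] := List.getElem?_eq_getElem hut1
    have hsomed : d[u.toNat]? = some d[u.toNat] := List.getElem?_eq_getElem hut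
    have hlvl_iff : d1[u.toNat] = lvl ↔ d[u.toNat] = lvl := by
      obtain ⟨p1, p2⟩ := hM.2 u.toNat hut
      by_cases hc : d[u.toNat]? = some (-1) ∧ P u.toNat
      · have e := p1 hc
        rw [hsome1] at e
        have e' : d1[u.toNat] = lvl + 1 := by simpa using e
        have hdm : d[u.toNat] = -1 := by rw [hsomed] at hc; simpa using hc.1
        constructor <;> intro h <;> omega
      · have e := p2 hc
        rw [hsome1, hsomed] at e
        have e' : d1[u.toNat] = d[u.toNat] := by simpa using e
        rw [e']
    -- translation of "still unvisited" between d1 and d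
    have hm1 : ∀ j : Nat, j < d.length → (d1[j]? = some (-1) ↔ (d[j]? = some (-1) ∧ ¬ P j)) := by
      intro j hj
      obtain ⟨p1, p2⟩ := hM.2 j hj
      by_cases hc : d[j]? = some (-1) ∧ P j
      · rw [p1 hc]
        constructor
        · intro h
          have : lvl + 1 = -1 := by simpa using h
          omega
        · rintro ⟨_, hnp⟩; exact absurd hc.2 hnp
      · rw [p2 hc]
        constructor
        · intro h; exact ⟨h, fun hp => hc ⟨h, hp⟩⟩
        · rintro ⟨h, _⟩; exact h
    simp only [List.foldl_cons]
    by_cases hl : d[u.toNat] = lvl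
    · have hdl : PySem.List.pyGet? d u = some lvl := by rw [hgetd, hsomed, hl]
      obtain ⟨row, hrow, hbv⟩ := hrows u hu0 hu1 hdl
      have hstep : stepU adj lvl (d1, c) u = row.foldl (stepV lvl) (d1, c) := by
        unfold stepU
        simp only [hget1, hsome1, if_pos (hlvl_iff.mpr hl), hrow]
      rw [hstep]
      have hbv1 : ∀ v ∈ row, 0 ≤ v ∧ v < (d1.length : Int) := by
        refine fun v hv => ⟨(hbv v hv).1, ?_⟩
        have := (hbv v hv).2; omega
      obtain ⟨hMrow, hFrow⟩ := charRowV lvl hlvl row d1 c hbv1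
      have hM2 : MidD lvl d (row.foldl (stepV lvl) (d1, c)).1 (fun j => P j ∨ (j : Int) ∈ row) :=
        MidD_comp lvl hlvl d _ _ _ _ hM hMrow
      have hIH := ih (fun v hv => hb v (List.mem_cons_of_mem _ hv))
        (row.foldl (stepV lvl) (d1, c)).1 (row.foldl (stepV lvl) (d1, c)).2 _ hM2
      rw [Prod.mk.eta] at hIH
      obtain ⟨hMfin, hFfin⟩ := hIH
      constructor
      · refine MidD_congr lvl d _ _ _ (fun j hj hd => ?_) hMfin
        constructor
        · rintro ((hp | hr) | ⟨u', hu', hl', hn⟩)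
          · exact Or.inl hp
          · exact Or.inr ⟨u, List.mem_cons_self .., hdl, row, hrow, hr⟩
          · exact Or.inr ⟨u', List.mem_cons_of_mem _ hu', hl', hn⟩
        · rintro (hp | ⟨u', hu', hl', hn⟩)
          · exact Or.inl (Or.inl hp)
          · rcases List.mem_cons.mp hu' with rfl | hu''
            · obtain ⟨row', hrow', hj'⟩ := hn
              rw [hrow] at hrow'
              injection hrow' with he
              subst he
              exact Or.inl (Or.inr hj')
            · exact Or.inr ⟨u', hu'', hl', hn⟩
      · rw [hFfin, hFrow]
        constructor
        · rintro ((hc | ⟨j, hj1, hdj1, hjr⟩) | ⟨j, hj, hdj, hnp', hEx⟩)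
          · exact Or.inl hc
          · have hj' : j < d.length := by omega
            obtain ⟨hdj, hnp⟩ := (hm1 j hj').mp hdj1
            exact Or.inr ⟨j, hj', hdj, hnp, u, List.mem_cons_self .., hdl, row, hrow, hjr⟩
          · obtain ⟨u', hu', hl', hn⟩ := hEx
            exact Or.inr ⟨j, hj, hdj, fun hp => hnp' (Or.inl hp),
              u', List.mem_cons_of_mem _ hu', hl', hn⟩
        · rintro (hc | ⟨j, hj, hdj, hnp, u', hu', hl', hn⟩)
          · exact Or.inl (Or.inl hc)
          · by_cases hjr : (j : Int) ∈ row
            · exact Or.inl (Or.inr ⟨j, by omega, (hm1 j hj).mpr ⟨hdj, hnp⟩, hjr⟩)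
            · rcases List.mem_cons.mp hu' with rfl | hu''
              · obtain ⟨row', hrow', hj'⟩ := hn
                rw [hrow] at hrow'
                injection hrow' with he
                subst he
                exact absurd hj' hjr
              · refine Or.inr ⟨j, hj, hdj, ?_, u', hu'', hl', hn⟩
                rintro (hp | hr)
                · exact hnp hp
                · exact hjr hr
    · have hstep : stepU adj lvl (d1, c) u = (d1, c) := by
        unfold stepU
        simp only [hget1, hsome1, if_neg (fun h => hl (hlvl_iff.mp h))]
      rw [hstep]
      have hnotu : ¬ PySem.List.pyGet? d u = some lvl := by
        rw [hgetd, hsomed]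
        intro h
        exact hl (by simpa using h)
      obtain ⟨hM', hF'⟩ := ih (fun v hv => hb v (List.mem_cons_of_mem _ hv)) d1 c P hM
      constructor
      · refine MidD_congr lvl d _ _ _ (fun j hj _ => ?_) hM'
        constructor
        · rintro (hp | ⟨u', hu', hl', hn⟩)
          · exact Or.inl hp
          · exact Or.inr ⟨u', List.mem_cons_of_mem _ hu', hl', hn⟩
        · rintro (hp | ⟨u', hu', hl', hn⟩)
          · exact Or.inl hp
          · rcases List.mem_cons.mp hu' with rfl | hu''
            · exact absurd hl' hnotu
            · exact Or.inr ⟨u', hu'', hl', hn⟩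
      · rw [hF']
        constructor
        · rintro (hc | ⟨j, hj, hdj, hnp, u', hu', hl', hn⟩)
          · exact Or.inl hc
          · exact Or.inr ⟨j, hj, hdj, hnp, u', List.mem_cons_of_mem _ hu', hl', hn⟩
        · rintro (hc | ⟨j, hj, hdj, hnp, u', hu', hl', hn⟩)
          · exact Or.inl hc
          · rcases List.mem_cons.mp hu' with rfl | hu''
            · exact absurd hl' hnotu
            · exact Or.inr ⟨j, hj, hdj, hnp, u', hu'', hl', hn⟩

-- The frontier fold's discovered list only ever grows.
theorem foldRow_snd_mono (lvl : Int) (row : List Int) :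
    ∀ (s : List Int × List Int) (x : Int), x ∈ s.2 → x ∈ (row.foldl (bfsStepB lvl) s).2 := by
  induction row with
  | nil => exact fun s x hx => hx
  | cons nb row ih =>
    intro s x hx
    simp only [List.foldl_cons]
    refine ih _ x ?_
    unfold bfsStepB
    cases hg : PySem.List.pyGet? s.1 nb with
    | none => exact hx
    | some v =>
      by_cases hv : v = -1
      · simp only [hv, if_pos rfl, if_true]
        exact List.mem_append_left _ hx
      · simpa [hv] using hx

theorem foldNode_snd_mono (adj : List (List Int)) (lvl : Int) (f : List Int) :
    ∀ (s : List Int × List Int) (x : Int), x ∈ s.2 → x ∈ (f.foldl (bfsNodeB adj lvl) s).2 := by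
  induction f with
  | nil => exact fun s x hx => hx
  | cons u f ih =>
    intro s x hx
    simp only [List.foldl_cons]
    refine ih _ x ?_
    unfold bfsNodeB
    cases hg : PySem.List.pyGet? adj u with
    | none => exact hx
    | some row => exact foldRow_snd_mono lvl row s x hx

-- Any position whose dist entry changed during the row fold was appended to the discovered list.
theorem foldRow_snd_complete (lvl : Int) (row : List Int) :
    ∀ (s : List Int × List Int), (∀ v ∈ row, 0 ≤ v) → ∀ j : Nat,
    (row.foldl (bfsStepB lvl) s).1[j]? ≠ s.1[j]? → (j : Int) ∈ (row.foldl (bfsStepB lvl) s).2 := by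
  induction row with
  | nil => intro s _ j hch; exact absurd rfl hch
  | cons nb row ih =>
    intro s hb j hch
    have hnb0 : 0 ≤ nb := hb nb (List.mem_cons_self ..)
    simp only [List.foldl_cons] at hch ⊢
    by_cases hstep : (row.foldl (bfsStepB lvl) (bfsStepB lvl s nb)).1[j]? = (bfsStepB lvl s nb).1[j]?
    · -- the change happened in this step
      have hch1 : (bfsStepB lvl s nb).1[j]? ≠ s.1[j]? := by rw [← hstep]; exact hch
      have hjnb : j = nb.toNat ∧ nb ∈ (bfsStepB lvl s nb).2 := by
        cases hg : PySem.List.pyGet? s.1 nb with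
        | none =>
          unfold bfsStepB at hch1
          rw [hg] at hch1
          exact absurd rfl hch1
        | some v =>
          by_cases hv : v = -1
          · unfold bfsStepB at hch1 ⊢
            rw [hg] at hch1 ⊢
            simp only [hv, if_true] at hch1 ⊢
            rw [PySem.List.pySetD_of_nonneg s.1 (lvl + 1) hnb0] at hch1
            constructor
            · by_contra hne
              exact hch1 (List.getElem?_set_ne (fun h => hne h.symm))
            · simp
          · unfold bfsStepB at hch1
            rw [hg] at hch1
            simp only [hv, if_false] at hch1
            exact absurd rfl hch1
      obtain ⟨hje, hmem⟩ := hjnb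
      have : (j : Int) = nb := by omega
      rw [this]
      exact foldRow_snd_mono lvl row _ nb hmem
    · exact ih (bfsStepB lvl s nb) (fun v hv => hb v (List.mem_cons_of_mem _ hv)) j hstep

theorem foldNode_snd_complete (adj : List (List Int)) (lvl : Int) (f : List Int) :
    ∀ (s : List Int × List Int),
    (∀ u ∈ f, ∃ row, PySem.List.pyGet? adj u = some row ∧ ∀ v ∈ row, 0 ≤ v) → ∀ j : Nat,
    (f.foldl (bfsNodeB adj lvl) s).1[j]? ≠ s.1[j]? → (j : Int) ∈ (f.foldl (bfsNodeB adj lvl) s).2 := by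
  induction f with
  | nil => intro s _ j hch; exact absurd rfl hch
  | cons u f ih =>
    intro s hr j hch
    obtain ⟨row, hrow, hb⟩ := hr u (List.mem_cons_self ..)
    have hnode : bfsNodeB adj lvl s u = row.foldl (bfsStepB lvl) s := by
      unfold bfsNodeB; rw [hrow]
    simp only [List.foldl_cons, hnode] at hch ⊢
    by_cases hstep : (f.foldl (bfsNodeB adj lvl) (row.foldl (bfsStepB lvl) s)).1[j]?
        = (row.foldl (bfsStepB lvl) s).1[j]?
    · have hch1 : (row.foldl (bfsStepB lvl) s).1[j]? ≠ s.1[j]? := by rw [← hstep]; exact hch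
      exact foldNode_snd_mono adj lvl f _ _ (foldRow_snd_complete lvl row s hb j hch1)
    · exact ih (row.foldl (bfsStepB lvl) s) (fun u' hu' => hr u' (List.mem_cons_of_mem _ hu')) j hstep

-- Shape of the freshly initialized dist array for a non-negative in-range start.
theorem d0_spec (mn start : Int) (h0 : 0 ≤ start) (h1 : start < mn) :
    (PySem.List.pySetD (List.replicate mn.toNat (-1 : Int)) start 0).length = mn.toNat ∧
    (∀ x ∈ PySem.List.pySetD (List.replicate mn.toNat (-1 : Int)) start 0, x = -1 ∨ x = 0) ∧
    (∀ n : Int, 0 ≤ n → n < (mn.toNat : Int) →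
      (PySem.List.pyGet? (PySem.List.pySetD (List.replicate mn.toNat (-1 : Int)) start 0) n = some 0
        ↔ n = start)) := by
  rw [PySem.List.pySetD_of_nonneg _ 0 h0]
  have hst : start.toNat < mn.toNat := by omega
  refine ⟨by simp, ?_, ?_⟩
  · intro x hx
    rcases List.mem_or_eq_of_mem_set hx with hmem | he
    · exact Or.inl (List.eq_of_mem_replicate hmem)
    · exact Or.inr he
  · intro n hn0 hn1
    have hnt : n.toNat < mn.toNat := by omega
    have hg : PySem.List.pyGet? ((List.replicate mn.toNat (-1 : Int)).set start.toNat 0) n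
        = ((List.replicate mn.toNat (-1 : Int)).set start.toNat 0)[n.toNat]? :=
      PySem.List.pyGet?_of_nonneg _ hn0
    rw [hg]
    by_cases he : n.toNat = start.toNat
    · rw [he, List.getElem?_set_self (by simpa using hst)]
      constructor
      · intro _; omega
      · intro _; rfl
    · rw [List.getElem?_set_ne (fun h => he h.symm), List.getElem?_replicate, if_pos hnt]
      constructor
      · intro h
        simp at h
      · intro h; exfalso; omega

-- One level of the frontier fold computes the same dist array as one scan round of B, and the
-- discovered list is empty exactly when the scan's changed flag stays false.
theorem bridge (adj : List (List Int)) (lvl mn : Int) (hlvl : 0 ≤ lvl) (d f : List Int)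
    (hlenmn : (d.length : Int) = mn)
    (hlb : ∀ x ∈ d, -1 ≤ x) (hub : ∀ x ∈ d, x ≤ lvl)
    (hrows : ∀ u : Int, 0 ≤ u → u < (d.length : Int) → PySem.List.pyGet? d u = some lvl →
      ∃ row, PySem.List.pyGet? adj u = some row ∧ ∀ v ∈ row, 0 ≤ v ∧ v < (d.length : Int))
    (hf : ∀ n : Int, n ∈ f ↔ (0 ≤ n ∧ n < (d.length : Int) ∧ PySem.List.pyGet? d n = some lvl)) :
    (f.foldl (bfsNodeB adj lvl) (d, [])).1
      = ((PySem.List.pyRange 0 mn 1).foldl (stepU adj lvl) (d, false)).1 ∧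
    ((f.foldl (bfsNodeB adj lvl) (d, [])).2 = []
      ↔ ((PySem.List.pyRange 0 mn 1).foldl (stepU adj lvl) (d, false)).2 = false) := by
  have hfr : ∀ u ∈ f, ∃ row, PySem.List.pyGet? adj u = some row ∧
      ∀ v ∈ row, 0 ≤ v ∧ v < (d.length : Int) := by
    intro u hu
    obtain ⟨h0, h1, h2⟩ := (hf u).mp hu
    exact hrows u h0 h1 h2
  have hMF := charNodeF adj lvl hlvl f d [] hfr
  have hrb : ∀ u ∈ PySem.List.pyRange 0 mn 1, 0 ≤ u ∧ u < (d.length : Int) := by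
    intro u hu
    have := PySem.List.mem_pyRange_one.mp hu
    constructor <;> omega
  have hMrefl : MidD lvl d d (fun _ => False) :=
    MidD_id lvl d _ (fun j hj hp => absurd hp not_false)
  obtain ⟨hMS, hFS⟩ := charScan adj lvl hlvl d hrows (PySem.List.pyRange 0 mn 1) hrb d false _ hMrefl
  have hPiff : ∀ j : Nat, ((∃ u ∈ f, NbrOf adj u j)
      ↔ (False ∨ ∃ u ∈ PySem.List.pyRange 0 mn 1, PySem.List.pyGet? d u = some lvl ∧ NbrOf adj u j)) := by
    intro j
    constructor
    · rintro ⟨u, hu, hn⟩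
      obtain ⟨h0, h1, h2⟩ := (hf u).mp hu
      exact Or.inr ⟨u, PySem.List.mem_pyRange_one.mpr ⟨h0, by omega⟩, h2, hn⟩
    · rintro (hFa | ⟨u, hu, hl', hn⟩)
      · exact absurd hFa not_false
      · have := PySem.List.mem_pyRange_one.mp hu
        exact ⟨u, (hf u).mpr ⟨this.1, by omega, hl'⟩, hn⟩
  have hfstEq := MidD_unique lvl d _ _ _ _ hMF hMS (fun j hj _ => hPiff j)
  refine ⟨hfstEq, ?_⟩
  -- the change condition shared by both sides
  have hGF := foldNodeB_inv adj lvl hlvl d.length f (d, [])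
    (fun n hn => ⟨((hf n).mp hn).1, ((hf n).mp hn).2.1, hfr n hn⟩)
    rfl hlb (fun n hn => absurd hn (List.not_mem_nil))
  have hcond : ((f.foldl (bfsNodeB adj lvl) (d, [])).2 ≠ []
      ↔ ∃ j : Nat, j < d.length ∧ d[j]? = some (-1) ∧ ∃ u ∈ f, NbrOf adj u j) := by
    constructor
    · intro hne
      obtain ⟨n, hn⟩ := List.exists_mem_of_ne_nil _ hne
      obtain ⟨hn0, hn1, hng⟩ := hGF.2.2.1 n hn
      have hj : n.toNat < d.length := by
        have := hGF.1
        omega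
      have hgeq : (f.foldl (bfsNodeB adj lvl) (d, [])).1[n.toNat]? = some (lvl + 1) := by
        rw [← PySem.List.pyGet?_of_nonneg _ hn0]
        exact hng
      by_cases hc : d[n.toNat]? = some (-1) ∧ ∃ u ∈ f, NbrOf adj u n.toNat
      · exact ⟨n.toNat, hj, hc.1, hc.2⟩
      · exfalso
        have := (hMF.2 n.toNat hj).2 hc
        rw [hgeq] at this
        have hmem : (lvl + 1) ∈ d := by
          have := this.symm
          exact List.mem_of_getElem? this
        have := hub _ hmem
        omega
    · rintro ⟨j, hj, hdj, hEx⟩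
      have hset : (f.foldl (bfsNodeB adj lvl) (d, [])).1[j]? = some (lvl + 1) :=
        (hMF.2 j hj).1 ⟨hdj, hEx⟩
      have hch : (f.foldl (bfsNodeB adj lvl) (d, [])).1[j]? ≠ d[j]? := by
        rw [hset, hdj]
        intro h
        have : lvl + 1 = -1 := by simpa using h
        omega
      have hmem := foldNode_snd_complete adj lvl f (d, [])
        (fun u hu => by
          obtain ⟨row, h1, h2⟩ := hfr u hu
          exact ⟨row, h1, fun v hv => (h2 v hv).1⟩) j hch
      exact fun he => by rw [he] at hmem; exact List.not_mem_nil hmem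
  constructor
  · intro hFe
    cases hs : ((PySem.List.pyRange 0 mn 1).foldl (stepU adj lvl) (d, false)).2 with
    | false => rfl
    | true =>
      exfalso
      rcases hFS.mp hs with hcf | ⟨j, hj, hdj, _, u, hu, hl', hn⟩
      · exact Bool.false_ne_true hcf
      · have : (f.foldl (bfsNodeB adj lvl) (d, [])).2 ≠ [] := by
          refine hcond.mpr ⟨j, hj, hdj, ?_⟩
          exact (hPiff j).mpr (Or.inr ⟨u, hu, hl', hn⟩)
        exact this hFe
  · intro hSf
    by_contra hne
    obtain ⟨j, hj, hdj, hEx⟩ := hcond.mp hne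
    have : ((PySem.List.pyRange 0 mn 1).foldl (stepU adj lvl) (d, false)).2 = true := by
      refine hFS.mpr (Or.inr ⟨j, hj, hdj, not_false, ?_⟩)
      rcases (hPiff j).mp hEx with hFa | h
      · exact absurd hFa not_false
      · exact h
    rw [hSf] at this
    exact Bool.false_ne_true this

-- The invariants needed to continue with the next level after one frontier fold.
theorem bridge_next (adj : List (List Int)) (lvl : Int) (hlvl : 0 ≤ lvl) (d f : List Int)
    (hlb : ∀ x ∈ d, -1 ≤ x) (hub : ∀ x ∈ d, x ≤ lvl)
    (hrows : ∀ u : Int, 0 ≤ u → u < (d.length : Int) → PySem.List.pyGet? d u = some lvl →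
      ∃ row, PySem.List.pyGet? adj u = some row ∧ ∀ v ∈ row, 0 ≤ v ∧ v < (d.length : Int))
    (hf : ∀ n : Int, n ∈ f ↔ (0 ≤ n ∧ n < (d.length : Int) ∧ PySem.List.pyGet? d n = some lvl)) :
    (f.foldl (bfsNodeB adj lvl) (d, [])).1.length = d.length ∧
    (∀ x ∈ (f.foldl (bfsNodeB adj lvl) (d, [])).1, -1 ≤ x) ∧
    (∀ x ∈ (f.foldl (bfsNodeB adj lvl) (d, [])).1, x ≤ lvl + 1) ∧
    (∀ n : Int, n ∈ (f.foldl (bfsNodeB adj lvl) (d, [])).2 ↔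
      (0 ≤ n ∧ n < ((f.foldl (bfsNodeB adj lvl) (d, [])).1.length : Int) ∧
        PySem.List.pyGet? (f.foldl (bfsNodeB adj lvl) (d, [])).1 n = some (lvl + 1))) := by
  have hfr : ∀ u ∈ f, ∃ row, PySem.List.pyGet? adj u = some row ∧
      ∀ v ∈ row, 0 ≤ v ∧ v < (d.length : Int) := by
    intro u hu
    obtain ⟨h0, h1, h2⟩ := (hf u).mp hu
    exact hrows u h0 h1 h2
  have hMF := charNodeF adj lvl hlvl f d [] hfr
  have hGF := foldNodeB_inv adj lvl hlvl d.length f (d, [])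
    (fun n hn => ⟨((hf n).mp hn).1, ((hf n).mp hn).2.1, hfr n hn⟩)
    rfl hlb (fun n hn => absurd hn (List.not_mem_nil))
  refine ⟨hGF.1, hGF.2.1, ?_, ?_⟩
  · intro x hx
    obtain ⟨j, hjlt, hjx⟩ := List.mem_iff_getElem.mp hx
    have hj : j < d.length := by have := hGF.1; omega
    by_cases hc : d[j]? = some (-1) ∧ ∃ u ∈ f, NbrOf adj u j
    · have := (hMF.2 j hj).1 hc
      rw [List.getElem?_eq_getElem hjlt] at this
      have : x = lvl + 1 := by rw [← hjx]; simpa using this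
      omega
    · have := (hMF.2 j hj).2 hc
      rw [List.getElem?_eq_getElem hjlt] at this
      have hxd : x ∈ d := by
        rw [← hjx]
        exact List.mem_of_getElem? this.symm
      have := hub x hxd
      omega
  · intro n
    constructor
    · intro hn
      obtain ⟨h0, h1, h2⟩ := hGF.2.2.1 n hn
      exact ⟨h0, h1, h2⟩
    · rintro ⟨h0, h1, h2⟩
      have hj : n.toNat < d.length := by have := hGF.1; omega
      have hgeq : (f.foldl (bfsNodeB adj lvl) (d, [])).1[n.toNat]? = some (lvl + 1) := by
        rw [← PySem.List.pyGet?_of_nonneg _ h0]; exact h2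
      have hc : d[n.toNat]? = some (-1) ∧ ∃ u ∈ f, NbrOf adj u n.toNat := by
        by_contra hc
        have := (hMF.2 n.toNat hj).2 hc
        rw [hgeq] at this
        have hmem : (lvl + 1) ∈ d := List.mem_of_getElem? this.symm
        have := hub _ hmem
        omega
      have hch : (f.foldl (bfsNodeB adj lvl) (d, [])).1[n.toNat]? ≠ d[n.toNat]? := by
        rw [hgeq, hc.1]
        intro h
        have : lvl + 1 = -1 := by simpa using h
        omega
      have hmem := foldNode_snd_complete adj lvl f (d, [])
        (fun u hu => by
          obtain ⟨row, hr1, hr2⟩ := hfr u hu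
          exact ⟨row, hr1, fun v hv => (hr2 v hv).1⟩) n.toNat hch
      have : ((n.toNat : Nat) : Int) = n := Int.toNat_of_nonneg h0
      rw [this] at hmem
      exact hmem

-- Main induction over distance levels: A's queue loop equals B's round loop.
theorem loopA_eq_rounds (adj : List (List Int)) (mn maxd : Int) (hadj : GoodAdj adj mn.toNat) :
    ∀ (k : Nat) (d f : List Int) (lvl : Int) (h : ∀ x ∈ d, -1 ≤ x),
    k = (maxd - lvl).toNat → 0 ≤ lvl → d.length = mn.toNat → 0 ≤ mn →
    (∀ x ∈ d, x ≤ lvl) →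
    (∀ n : Int, n ∈ f ↔ (0 ≤ n ∧ n < (d.length : Int) ∧ PySem.List.pyGet? d n = some lvl)) →
    bfsLoopA adj maxd d f h = roundsB adj mn maxd d lvl := by
  intro k
  induction k with
  | zero =>
    intro d f lvl h hk hl0 hlen hmn hub hf
    have hle : maxd ≤ lvl := by omega
    rw [roundsB, if_pos hle]
    exact loopA_skip adj maxd lvl hle f d h (fun n hn => ((hf n).mp hn).2.2)
  | succ k ihk =>
    intro d f lvl h hk hl0 hlen hmn hub hf
    have hlt : lvl < maxd := by omega
    have hlenmn : (d.length : Int) = mn := by omega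
    have hrows : ∀ u : Int, 0 ≤ u → u < (d.length : Int) → PySem.List.pyGet? d u = some lvl →
        ∃ row, PySem.List.pyGet? adj u = some row ∧ ∀ v ∈ row, 0 ≤ v ∧ v < (d.length : Int) := by
      intro u h0 h1 _
      obtain ⟨row, hr, hb⟩ := pv_adj_row adj mn.toNat hadj u h0 (by omega)
      exact ⟨row, hr, fun v hv => ⟨(hb v hv).1, by have := (hb v hv).2; omega⟩⟩
    obtain ⟨hfstEq, hsndIff⟩ := bridge adj lvl mn hl0 d f hlenmn h hub hrows hf
    obtain ⟨hlenF, hlbF, hubF, hfF⟩ := bridge_next adj lvl hl0 d f h hub hrows hf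
    have hgf : GoodF d f lvl := fun n hn => (hf n).mp hn
    have hA : bfsLoopA adj maxd d f h
        = bfsLoopA adj maxd (f.foldl (bfsNodeB adj lvl) (d, [])).1
            (f.foldl (bfsNodeB adj lvl) (d, [])).2 hlbF :=
      calc bfsLoopA adj maxd d f h
          = bfsLoopA adj maxd d (f ++ []) h :=
            bfsLoopA_congr adj maxd _ _ _ _ h h rfl (by simp)
        _ = bfsLoopA adj maxd (f.foldl (bfsNodeB adj lvl) (d, [])).1
              ([] ++ (f.foldl (bfsNodeB adj lvl) (d, [])).2) hlbF :=
            loopA_level adj maxd mn.toNat hadj lvl hl0 hlt f d [] h hlbF hlen hgf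
        _ = bfsLoopA adj maxd (f.foldl (bfsNodeB adj lvl) (d, [])).1
              (f.foldl (bfsNodeB adj lvl) (d, [])).2 hlbF :=
            bfsLoopA_congr adj maxd _ _ _ _ hlbF hlbF rfl (by simp)
    rw [hA, roundsB, if_neg (by omega : ¬ maxd ≤ lvl)]
    by_cases hF2 : (f.foldl (bfsNodeB adj lvl) (d, [])).2 = []
    · have hS2 := hsndIff.mp hF2
      rw [hF2, bfsLoopA]
      simp only [hS2, Bool.false_eq_true, if_false, ← hfstEq]
    · have hS2 : ((PySem.List.pyRange 0 mn 1).foldl (stepU adj lvl) (d, false)).2 = true := by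
        cases hs : ((PySem.List.pyRange 0 mn 1).foldl (stepU adj lvl) (d, false)).2 with
        | false => exact absurd (hsndIff.mpr hs) hF2
        | true => rfl
      simp only [hS2, if_true, ← hfstEq]
      exact ihk (f.foldl (bfsNodeB adj lvl) (d, [])).1 (f.foldl (bfsNodeB adj lvl) (d, [])).2
        (lvl + 1) hlbF (by omega) (by omega) (by rw [hlenF]; exact hlen) hmn hubF hfF

-- ===== VERDICT (by name: the statement is the Claim_ definition above) =====
theorem efficient_bfs_distances_py_spec : Claim_equal_efficient_bfs_distances_py := by
  intro adj start mn md _ hpre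
  obtain ⟨hIR, hcase⟩ := hpre
  unfold Spec_efficient_bfs_distances_py efficient_bfs_distances_py efficient_bfs_distances_py_alt
  have hget0 := pv_init_get_start mn start hIR
  have hmnpos : 0 < mn := by
    obtain ⟨hA, hB⟩ := hIR
    omega
  rcases hcase with hmd | ⟨hs0, hrow0⟩ | ⟨h1, h3, h4⟩
  · -- max_distance ≤ 0: the start node is popped and immediately skipped; B runs no round
    refine congrArg _ ?_
    rw [bfsLoopA]
    simp only [hget0]
    rw [if_pos (by omega : md ≤ (0 : Int)), bfsLoopA, roundsB, if_pos (by omega : md ≤ (0 : Int))]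
  · -- non-negative start with an empty row: one round discovers nothing
    by_cases hmd : md ≤ 0
    · refine congrArg _ ?_
      rw [bfsLoopA]
      simp only [hget0]
      rw [if_pos (by omega : md ≤ (0 : Int)), bfsLoopA, roundsB, if_pos (by omega : md ≤ (0 : Int))]
    · refine congrArg _ ?_
      have hstartlt : start < mn := by
        obtain ⟨hA, hB⟩ := hIR
        omega
      obtain ⟨hlen0, hent0, hiff0⟩ := d0_spec mn start hs0 hstartlt
      have hF : ([start].foldl (bfsNodeB adj 0)
          (PySem.List.pySetD (List.replicate mn.toNat (-1 : Int)) start 0, ([] : List Int)))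
          = (PySem.List.pySetD (List.replicate mn.toNat (-1 : Int)) start 0, ([] : List Int)) := by
        simp only [List.foldl_cons, List.foldl_nil]
        unfold bfsNodeB
        rw [hrow0]
        rfl
      obtain ⟨hfstEq, hsndIff⟩ := bridge adj 0 mn le_rfl
        (PySem.List.pySetD (List.replicate mn.toNat (-1 : Int)) start 0) [start]
        (by rw [hlen0]; omega)
        (fun x hx => by rcases hent0 x hx with h | h <;> omega)
        (fun x hx => by rcases hent0 x hx with h | h <;> omega)
        (by
          intro u h0 hlt hl
          have hu : u = start := (hiff0 u h0 (by rw [hlen0] at hlt; exact hlt)).mp hl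
          rw [hu]
          exact ⟨[], hrow0, by simp⟩)
        (by
          intro n
          simp only [List.mem_singleton]
          constructor
          · rintro rfl
            exact ⟨hs0, by rw [hlen0]; omega, hget0⟩
          · rintro ⟨h0, hlt, hl⟩
            exact (hiff0 n h0 (by rw [hlen0] at hlt; exact hlt)).mp hl)
      rw [hF] at hfstEq hsndIff
      have hS2 : (((PySem.List.pyRange 0 mn 1).foldl (stepU adj 0)
          (PySem.List.pySetD (List.replicate mn.toNat (-1 : Int)) start 0, false))).2 = false :=
        hsndIff.mp rfl
      -- A side: pop start, expand the empty row, drain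
      rw [bfsLoopA]
      simp only [hget0]
      rw [if_neg (by omega : ¬ md ≤ (0 : Int))]
      simp only [hrow0]
      refine Eq.trans (bfsLoopA_congr adj md _ _ _ [] _ (pv_init_allge mn start) rfl rfl) ?_
      rw [bfsLoopA]
      -- B side: one round, unchanged, break
      rw [roundsB, if_neg (by omega : ¬ md ≤ (0 : Int))]
      simp only [hS2, Bool.false_eq_true, if_false]
      exact hfstEq
  · -- globally well-formed graph: level-by-level main induction
    refine congrArg _ ?_
    have hstartlt : start < mn := by
      obtain ⟨hA, hB⟩ := hIR
      omega
    obtain ⟨hlen0, hent0, hiff0⟩ := d0_spec mn start h1 hstartlt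
    have hgadj : GoodAdj adj mn.toNat := by
      refine ⟨by omega, fun row hrow v hv => ?_⟩
      obtain ⟨a, b⟩ := h4 row hrow v hv
      exact ⟨a, by omega⟩
    refine loopA_eq_rounds adj mn md hgadj (md - 0).toNat
      (PySem.List.pySetD (List.replicate mn.toNat (-1 : Int)) start 0) [start] 0
      (pv_init_allge mn start) rfl le_rfl hlen0 (by omega)
      (fun x hx => by rcases hent0 x hx with h | h <;> omega) ?_
    intro n
    simp only [List.mem_singleton]
    constructor
    · rintro rfl
      exact ⟨h1, by rw [hlen0]; omega, hget0⟩
    · rintro ⟨h0, hlt, hl⟩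
      exact (hiff0 n h0 (by rw [hlen0] at hlt; exact hlt)).mp hl
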